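-- pv_equiv track=rewrite | github.com/ryanvilbrandt/advent_of_code | aoc_2022/day_1/problem.py | group_by_elf
-- ===== SOURCE A (Python) =====
-- from typing import List, Tuple
--
-- def group_by_elf(items: List[str]) -> List[List[int]]:
--     elves = []
--     elf = []
--     for item in items:
--         if not item:
--             elves.append(elf)
--             elf = []
--         else:
--             elf.append(int(item))
--     elves.append(elf)
--     return elves
-- ===== SOURCE B (Python) =====
-- from typing import List, Tuple
--
-- def group_by_elf(items: List[str]) -> List[List[int]]:
--     # Different decomposition: recursion on the first blank separator instead of
--     # an accumulator loop.
--     for i, x in enumerate(items):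
--         if not x:
--             return [[int(y) for y in items[:i]]] + group_by_elf(items[i + 1:])
--     return [[int(y) for y in items]]
-- ===== Notes on version B (the rewrite author's own statement) =====
-- stated objective: alternative
-- what changed: Replaces A's single accumulator loop (mutable current-group + result list) with recursion on the first blank separator: slice off the segment before the first blank, map int over it, and recurse on the rest.
import Mathlib
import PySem

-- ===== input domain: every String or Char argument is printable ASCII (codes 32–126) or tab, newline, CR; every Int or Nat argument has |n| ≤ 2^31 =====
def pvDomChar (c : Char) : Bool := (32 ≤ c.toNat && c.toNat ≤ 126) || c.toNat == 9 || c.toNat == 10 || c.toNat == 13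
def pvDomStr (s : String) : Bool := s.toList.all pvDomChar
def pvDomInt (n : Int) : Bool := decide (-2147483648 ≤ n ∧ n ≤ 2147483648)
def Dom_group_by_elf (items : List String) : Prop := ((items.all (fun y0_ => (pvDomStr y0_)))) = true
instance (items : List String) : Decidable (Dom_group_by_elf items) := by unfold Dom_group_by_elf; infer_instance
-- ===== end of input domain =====

-- B recurses on the first blank separator (slice, map int, recurse) instead of A's accumulator loop; alternative decomposition, same cost.

-- ===== PORT A =====
def group_by_elf (items : List String) : List (List Int) :=
  let st := items.foldl
    (fun (st : List (List Int) × List Int) item =>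
      if item = "" then (st.1 ++ [st.2], ([] : List Int))
      else (st.1, st.2 ++ [(PySem.Int.ofStr? item).getD 0]))
    ([], [])
  st.1 ++ [st.2]

-- ===== PORT B =====
-- transcription of B's 'for i, x in enumerate(items): if not x: …' search for the first blank
def pvFirstBlank : List String → Option Nat
  | [] => none
  | x :: xs => if x = "" then some 0 else (pvFirstBlank xs).map (· + 1)

-- used by the port's decreasing_by
theorem pvFirstBlank_lt : ∀ {xs : List String} {i : Nat}, pvFirstBlank xs = some i → i < xs.length := by
  intro xs
  induction xs with
  | nil => intro i h; simp [pvFirstBlank] at h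
  | cons x xs ih =>
    intro i h
    simp only [pvFirstBlank] at h
    split at h
    · simp only [Option.some.injEq] at h; subst h; simp
    · simp only [Option.map_eq_some_iff] at h
      obtain ⟨j, hj, rfl⟩ := h
      have := ih hj
      simp only [List.length_cons]; omega

def group_by_elf_alt (items : List String) : List (List Int) :=
  match h : pvFirstBlank items with
  | some i =>
      ((PySem.List.slice items none (some (i : Int))).map (fun y => (PySem.Int.ofStr? y).getD 0))
        :: group_by_elf_alt (PySem.List.slice items (some ((i : Int) + 1)) none)
  | none => [items.map (fun y => (PySem.Int.ofStr? y).getD 0)]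
termination_by items.length
decreasing_by
  have hi := pvFirstBlank_lt h
  have : ((i : Int) + 1) = ((i + 1 : Nat) : Int) := by push_cast; ring
  rw [this, PySem.List.slice_from_natCast]
  simp
  omega

-- ===== PRECONDITION & SPEC =====
-- Pre_ excludes exactly the inputs on which Python's int() raises ValueError on some non-empty item.
def Pre_group_by_elf (items : List String) : Prop :=
  (items.all (fun s => s == "" || (PySem.Int.ofStr? s).isSome)) = true
instance (items : List String) : Decidable (Pre_group_by_elf items) := by unfold Pre_group_by_elf; infer_instance
def pvWitness_group_by_elf : List String := ["1", "2", "", "3"]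
def Spec_group_by_elf (items : List String) (out : List (List Int)) : Prop := out = group_by_elf_alt items
instance (items : List String) (out : List (List Int)) : Decidable (Spec_group_by_elf items out) := by unfold Spec_group_by_elf; infer_instance

-- ===== CLAIM (what is proved, stated in full; the proofs are below) =====
def Claim_equal_group_by_elf : Prop := ∀ (items : List String), Dom_group_by_elf items → Pre_group_by_elf items → Spec_group_by_elf items (group_by_elf items)

-- ===== LEMMAS AND PROOFS =====

theorem alt_none {items : List String} (h : pvFirstBlank items = none) :
    group_by_elf_alt items = [items.map (fun y => (PySem.Int.ofStr? y).getD 0)] := by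
  rw [group_by_elf_alt]; split <;> simp_all

theorem alt_some {items : List String} {i : Nat} (h : pvFirstBlank items = some i) :
    group_by_elf_alt items
      = ((items.take i).map (fun y => (PySem.Int.ofStr? y).getD 0))
        :: group_by_elf_alt (items.drop (i + 1)) := by
  rw [group_by_elf_alt]; split
  · rename_i k heq
    rw [heq] at h
    obtain rfl : k = i := Option.some.inj h
    rw [show ((k : Int) + 1) = ((k + 1 : Nat) : Int) by push_cast; ring,
      PySem.List.slice_from_natCast, PySem.List.slice_to_natCast]
  · rename_i heq
    rw [heq] at h
    exact absurd h (by simp)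

theorem alt_blank (xs : List String) :
    group_by_elf_alt ("" :: xs) = [] :: group_by_elf_alt xs := by
  rw [alt_some (show pvFirstBlank ("" :: xs) = some 0 by simp [pvFirstBlank])]
  simp

theorem alt_cons (x : String) (hx : ¬ x = "") (xs : List String) :
    group_by_elf_alt (x :: xs)
      = List.modifyHead (fun g => (PySem.Int.ofStr? x).getD 0 :: g) (group_by_elf_alt xs) := by
  cases h : pvFirstBlank xs with
  | none =>
    have h' : pvFirstBlank (x :: xs) = none := by simp [pvFirstBlank, hx, h]
    rw [alt_none h, alt_none h']
    simp
  | some i =>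
    have h' : pvFirstBlank (x :: xs) = some (i + 1) := by simp [pvFirstBlank, hx, h]
    rw [alt_some h, alt_some h']
    simp [List.take_succ_cons, List.drop_succ_cons]

theorem fold_key (items : List String) : ∀ (elves : List (List Int)) (elf : List Int),
    (items.foldl
      (fun (st : List (List Int) × List Int) item =>
        if item = "" then (st.1 ++ [st.2], ([] : List Int))
        else (st.1, st.2 ++ [(PySem.Int.ofStr? item).getD 0]))
      (elves, elf)).1
    ++ [(items.foldl
      (fun (st : List (List Int) × List Int) item =>
        if item = "" then (st.1 ++ [st.2], ([] : List Int))
        else (st.1, st.2 ++ [(PySem.Int.ofStr? item).getD 0]))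
      (elves, elf)).2]
    = elves ++ List.modifyHead (fun g => elf ++ g) (group_by_elf_alt items) := by
  induction items with
  | nil =>
    intro elves elf
    rw [alt_none (show pvFirstBlank [] = none from rfl)]
    simp
  | cons x xs ih =>
    intro elves elf
    by_cases hx : x = ""
    · subst hx
      rw [alt_blank]
      simp only [List.foldl_cons, reduceIte]
      rw [ih (elves ++ [elf]) []]
      cases group_by_elf_alt xs <;> simp [List.modifyHead]
    · rw [alt_cons x hx xs]
      simp only [List.foldl_cons, if_neg hx]
      rw [ih elves (elf ++ [(PySem.Int.ofStr? x).getD 0])]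
      cases group_by_elf_alt xs <;> simp [List.modifyHead]

-- ===== VERDICT (by name: the statement is the Claim_ definition above) =====
theorem group_by_elf_spec : Claim_equal_group_by_elf := by
  intro items _ _
  unfold Spec_group_by_elf group_by_elf
  have h := fold_key items [] []
  simp only [List.nil_append] at h
  rw [h]
  cases group_by_elf_alt items <;> simp [List.modifyHead]
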